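-- pv_equiv track=rewrite | github.com/xnscdev/LH-STEVE | prepare_embeds.py | batch_runs
-- ===== SOURCE A (Python) =====
-- import math
-- from itertools import islice
--
-- def batch_runs(runs, batches):
--     batch_size = math.ceil(len(runs) / batches)
--     it = iter(runs)
--     while True:
--         batch = tuple(islice(it, batch_size))
--         if not batch:
--             break
--         yield batch
-- ===== SOURCE B (Python) =====
-- import math
--
-- def batch_runs(runs, batches):
--     batch_size = math.ceil(len(runs) / batches)
--     if not runs:
--         return
--     for i in range(0, len(runs), batch_size):
--         yield tuple(runs[i:i + batch_size])
-- ===== Notes on version B (the rewrite author's own statement) =====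
-- stated objective: idiomatic
-- what changed: Replaces the stateful while-loop that repeatedly consumes an iterator with islice by a direct index-stepping for-loop over range(0, len(runs), batch_size) that slices the sequence.
-- outside the precondition, e.g. on batch_runs([1, 2], 0): A raises ZeroDivisionError, B raises ZeroDivisionError; on batch_runs([1, 2], -1): A raises ValueError, B returns []; on batch_runs([3, -1, 7, 5, 189, 3], -8879): A returns [], B raises ValueError
import Mathlib
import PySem

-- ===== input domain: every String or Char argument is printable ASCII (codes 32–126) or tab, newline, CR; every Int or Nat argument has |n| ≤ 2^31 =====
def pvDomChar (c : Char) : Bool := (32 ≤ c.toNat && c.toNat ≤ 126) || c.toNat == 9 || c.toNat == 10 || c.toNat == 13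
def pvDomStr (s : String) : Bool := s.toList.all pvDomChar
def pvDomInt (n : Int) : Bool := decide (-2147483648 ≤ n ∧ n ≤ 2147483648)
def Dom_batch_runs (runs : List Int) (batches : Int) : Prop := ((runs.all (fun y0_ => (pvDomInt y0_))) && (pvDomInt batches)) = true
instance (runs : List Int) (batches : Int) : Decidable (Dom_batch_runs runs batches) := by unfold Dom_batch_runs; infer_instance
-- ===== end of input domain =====

-- B differs from A only in traversal style (index-stepped slices vs islice over a
-- consumed iterator); equivalence is about the list of yielded batches.

-- ===== PORT A =====
-- while True: take the next batch_size elements from the iterator; stop when the batch is empty.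
-- islice with a zero bound yields the empty tuple (break); a negative bound raises (outside Pre_, junk []).
def batchRunsLoopA (bs : Int) (l : List Int) : List (List Int) :=
  if h : l = [] ∨ bs ≤ 0 then []
  else l.take bs.toNat :: batchRunsLoopA bs (l.drop bs.toNat)
termination_by l.length
decreasing_by
  push Not at h
  obtain ⟨hl, hb⟩ := h
  have : 1 ≤ bs.toNat := by omega
  have : 0 < l.length := List.length_pos_iff.mpr hl
  simp [List.length_drop]; omega

-- math.ceil(len(runs) / batches) = -((-len) // batches); exact for these magnitudes
-- since the float quotient cannot misround across an integer here.
def batch_runs (runs : List Int) (batches : Int) : List (List Int) :=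
  let batch_size : Int := -(PySem.Int.floordiv (-(runs.length : Int)) batches)
  batchRunsLoopA batch_size runs

-- ===== PORT B =====
-- for i in range(0, len(runs), batch_size): yield tuple(runs[i:i+batch_size])
-- (nonnegative in-range slice: runs[i:i+bs] = (runs.drop i).take bs)
def batchRunsLoopB (runs : List Int) (bs : Int) (i : Nat) : List (List Int) :=
  if h : 0 < bs ∧ i < runs.length then
    (runs.drop i).take bs.toNat :: batchRunsLoopB runs bs (i + bs.toNat)
  else []
termination_by runs.length - i
decreasing_by
  obtain ⟨hb, hi⟩ := h
  have : 1 ≤ bs.toNat := by omega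
  omega

def batch_runs_alt (runs : List Int) (batches : Int) : List (List Int) :=
  let batch_size : Int := -(PySem.Int.floordiv (-(runs.length : Int)) batches)
  if runs = [] then []
  else batchRunsLoopB runs batch_size 0

-- ===== PRECONDITION & SPEC =====
-- Pre_ excludes batches = 0 (both programs raise ZeroDivisionError) and batches < 0 with
-- nonempty runs: there A either raises ValueError (negative islice bound) or, when
-- |batches| > len(runs), accidentally yields nothing from a zero batch_size, while B's
-- range(0, len, 0) raises ValueError.
def Pre_batch_runs (runs : List Int) (batches : Int) : Prop :=
  0 < batches ∨ (runs = [] ∧ batches < 0)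
instance (runs : List Int) (batches : Int) : Decidable (Pre_batch_runs runs batches) := by
  unfold Pre_batch_runs; infer_instance

def pvWitness_batch_runs : List Int × Int := ([1, 2, 3, 4, 5], 2)

def Spec_batch_runs (runs : List Int) (batches : Int) (out : List (List Int)) : Prop := out = batch_runs_alt runs batches
instance (runs : List Int) (batches : Int) (out : List (List Int)) : Decidable (Spec_batch_runs runs batches out) := by unfold Spec_batch_runs; infer_instance

-- ===== CLAIM (what is proved, stated in full; the proofs are below) =====
def Claim_equal_batch_runs : Prop := ∀ (runs : List Int) (batches : Int), Dom_batch_runs runs batches → Pre_batch_runs runs batches → Spec_batch_runs runs batches (batch_runs runs batches)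

-- ===== LEMMAS AND PROOFS =====

-- B's index loop is A's drop loop, started at offset i.
theorem loopB_eq_loopA (runs : List Int) (bs : Int) (hb : 0 < bs) :
    ∀ i : Nat, batchRunsLoopB runs bs i = batchRunsLoopA bs (runs.drop i) := by
  suffices key : ∀ k i, runs.length - i = k →
      batchRunsLoopB runs bs i = batchRunsLoopA bs (runs.drop i) from
    fun i => key _ i rfl
  intro k
  induction k using Nat.strong_induction_on with
  | _ k ih =>
    intro i hk
    rw [batchRunsLoopB, batchRunsLoopA]
    by_cases hi : i < runs.length
    · have hne : runs.drop i ≠ [] := by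
        simp [List.drop_eq_nil_iff]; omega
      rw [dif_pos ⟨hb, hi⟩, dif_neg (by push Not; exact ⟨hne, hb⟩)]
      have hbn : 1 ≤ bs.toNat := by omega
      rw [ih (runs.length - (i + bs.toNat)) (by omega) (i + bs.toNat) rfl,
        List.drop_drop]
    · have hd : runs.drop i = [] := by
        rw [List.drop_eq_nil_iff]; omega
      rw [dif_neg (fun hc => hi hc.2), dif_pos (Or.inl hd)]

theorem ceil_pos (n b : Int) (hn : 0 < n) (hb : 0 < b) :
    0 < -(PySem.Int.floordiv (-n) b) := by
  have h := PySem.Int.floordiv_mul_add_mod (-n) b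
  have h1 : 0 ≤ PySem.Int.mod (-n) b := PySem.Int.mod_nonneg _ hb
  have h2 : PySem.Int.mod (-n) b < b := PySem.Int.mod_lt _ hb
  nlinarith [h, h1, h2]

-- ===== VERDICT (by name: the statement is the Claim_ definition above) =====
theorem batch_runs_spec : Claim_equal_batch_runs := by
  intro runs batches _ hpre
  unfold Spec_batch_runs batch_runs batch_runs_alt
  rcases hpre with hb | ⟨hnil, _⟩
  · by_cases hr : runs = []
    · subst hr
      simp [batchRunsLoopA]
    · rw [if_neg hr]
      have hn : 0 < (runs.length : Int) := by
        have := List.length_pos_iff.mpr hr; exact_mod_cast this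
      rw [loopB_eq_loopA _ _ (ceil_pos _ _ hn hb) 0, List.drop_zero]
  · subst hnil
    simp [batchRunsLoopA]
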